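-- pv_equiv track=rewrite | github.com/IsaacG/Advent-of-Code | codyssi/problem01.py | solve
-- ===== SOURCE A (Python) =====
-- def solve(part: int, data: str, testing: bool) -> int:
--     """Solve the puzzle."""
--     numbers = (int(i) for i in data.splitlines())
--     if part == 1:
--         return sum(numbers)
--     if part == 2:
--         return sum(sorted(numbers)[:-2 if testing else -20])
--     numlist = list(numbers)
--     return sum(numlist[::2]) - sum(numlist[1::2])
-- ===== SOURCE B (Python) =====
-- def solve(part: int, data: str, testing: bool) -> int:
--     """Solve the puzzle."""
--     numlist = [int(i) for i in data.splitlines()]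
--     if part == 1:
--         return sum(numlist)
--     if part == 2:
--         # one O(n*k) pass keeping the k largest; answer = total - their sum
--         k = 2 if testing else 20
--         top = []  # ascending list of (up to) the k largest seen so far
--         for n in numlist:
--             if len(top) < k or n > top[0]:
--                 i = 0
--                 while i < len(top) and top[i] <= n:
--                     i += 1
--                 top.insert(i, n)
--                 if len(top) > k:
--                     top.pop(0)
--         return sum(numlist) - sum(top)
--     total = 0
--     sign = 1
--     for n in numlist:
--         total += sign * n
--         sign = -sign
--     return total
-- ===== Notes on version B (the rewrite author's own statement) =====
-- stated objective: alternative
-- what changed: Part 2 no longer sorts the whole list and slices: B keeps a bounded ascending buffer of the k largest numbers in one pass and returns total minus their sum; part 3 replaces the two strided slices by a single signed fold.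
import Mathlib
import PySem

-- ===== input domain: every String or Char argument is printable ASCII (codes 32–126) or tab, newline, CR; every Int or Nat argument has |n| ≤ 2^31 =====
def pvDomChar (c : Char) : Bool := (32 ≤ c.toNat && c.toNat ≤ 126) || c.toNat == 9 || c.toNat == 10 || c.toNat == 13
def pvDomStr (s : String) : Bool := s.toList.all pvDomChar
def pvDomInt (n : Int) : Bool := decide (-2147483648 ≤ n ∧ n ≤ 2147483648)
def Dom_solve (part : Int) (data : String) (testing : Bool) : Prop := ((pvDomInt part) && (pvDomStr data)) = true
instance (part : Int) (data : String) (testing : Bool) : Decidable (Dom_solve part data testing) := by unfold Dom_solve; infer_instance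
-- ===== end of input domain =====

-- B replaces A's part-2 full sort-and-slice by a single one-pass selection of the k
-- largest numbers (answer = total − their sum) and A's part-3 pair of strided slices
-- by one signed fold (objective: alternative algorithm, similar cost).

-- ===== PORT A =====
def solve (part : Int) (data : String) (testing : Bool) : Int :=
  let numbers := (PySem.Str.splitlines data).map (fun i => (PySem.Int.ofStr? i).getD 0)
  if part = 1 then numbers.sum
  else if part = 2 then
    (PySem.List.slice (PySem.List.sorted numbers (fun x => x) false) none
      (some (if testing then -2 else -20))).sum
  else
    ((PySem.List.slice? numbers none none 2).getD []).sum
      - ((PySem.List.slice? numbers (some 1) none 2).getD []).sum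

-- ===== PORT B =====
-- the `while i < len(top) and top[i] <= n … top.insert(i, n)` loop of Source B
def insertAsc (top : List Int) (n : Int) : List Int :=
  match top with
  | [] => [n]
  | t :: ts => if t ≤ n then t :: insertAsc ts n else n :: t :: ts

-- one iteration of Source B's part-2 loop body
def topStep (k : Nat) (top : List Int) (n : Int) : List Int :=
  if top.length < k ∨ top.headD 0 < n then
    let top' := insertAsc top n
    if k < top'.length then top'.tail else top'
  else top

def solve_alt (part : Int) (data : String) (testing : Bool) : Int :=
  let numlist := (PySem.Str.splitlines data).map (fun i => (PySem.Int.ofStr? i).getD 0)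
  if part = 1 then numlist.sum
  else if part = 2 then
    let k : Nat := if testing then 2 else 20
    numlist.sum - (numlist.foldl (topStep k) []).sum
  else
    (numlist.foldl (fun (p : Int × Int) n => (p.1 + p.2 * n, -p.2)) (0, 1)).1

-- ===== PRECONDITION & SPEC =====
-- Pre_ excludes exactly the inputs on which Python's int() raises ValueError on some line.
def Pre_solve (part : Int) (data : String) (testing : Bool) : Prop :=
  ∀ l ∈ PySem.Str.splitlines data, (PySem.Int.ofStr? l).isSome = true
instance (part : Int) (data : String) (testing : Bool) : Decidable (Pre_solve part data testing) := by
  unfold Pre_solve; infer_instance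

def pvWitness_solve : Int × String × Bool := (2, "3\n1\n2", true)

def Spec_solve (part : Int) (data : String) (testing : Bool) (out : Int) : Prop := out = solve_alt part data testing
instance (part : Int) (data : String) (testing : Bool) (out : Int) : Decidable (Spec_solve part data testing out) := by unfold Spec_solve; infer_instance

-- ===== CLAIM (what is proved, stated in full; the proofs are below) =====
def Claim_equal_solve : Prop := ∀ (part : Int) (data : String) (testing : Bool), Dom_solve part data testing → Pre_solve part data testing → Spec_solve part data testing (solve part data testing)

-- ===== LEMMAS AND PROOFS =====

-- the last k elements of a list (what Source B's bounded buffer holds)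
def lastK (k : Nat) (s : List Int) : List Int := s.drop (s.length - k)

theorem lastK_nil (k : Nat) : lastK k [] = [] := by unfold lastK; simp

theorem lastK_cons (k : Nat) (a : Int) (s : List Int) :
    lastK k (a :: s) = if s.length + 1 ≤ k then a :: s else lastK k s := by
  unfold lastK
  split_ifs with h
  · simp [Nat.sub_eq_zero_of_le h]
  · have : s.length + 1 - k = (s.length - k) + 1 := by omega
    simp [this]

theorem lastK_of_le (k : Nat) (s : List Int) (h : s.length ≤ k) : lastK k s = s := by
  unfold lastK; rw [Nat.sub_eq_zero_of_le h]; simp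

theorem length_lastK (k : Nat) (s : List Int) : (lastK k s).length = min s.length k := by
  unfold lastK; simp; omega

theorem length_insertAsc (top : List Int) (n : Int) :
    (insertAsc top n).length = top.length + 1 := by
  induction top with
  | nil => rfl
  | cons t ts ih => simp only [insertAsc]; split_ifs <;> simp [ih]

theorem insertAsc_of_ge (s : List Int) (n : Int) (h : ∀ x ∈ s, n ≤ x) :
    insertAsc s n = n :: s := by
  induction s with
  | nil => rfl
  | cons x r ih =>
    simp only [insertAsc]
    split_ifs with hx
    · have hnx : n = x := le_antisymm (h x (by simp)) hx
      rw [ih (fun y hy => h y (by simp [hy]))]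
      simp [hnx]
    · rfl

theorem insertAsc_eq_insertBy (s : List Int) (n : Int) :
    insertAsc s n = PySem.List.insertBy (fun a b => decide (a < b)) n s := by
  induction s with
  | nil => rfl
  | cons t ts ih =>
    simp only [insertAsc, PySem.List.insertBy]
    by_cases h : t ≤ n
    · simp [h, not_lt.mpr h, ih]
    · simp [h, lt_of_not_ge h]

theorem mem_lastK {k : Nat} {s : List Int} {x : Int} (hx : x ∈ lastK k s) : x ∈ s := by
  unfold lastK at hx; exact List.mem_of_mem_drop hx

-- the central step lemma: on a sorted buffer the bounded insertion of Source B
-- is insertion followed by keeping the last k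
theorem topStep_lastK (k : Nat) (hk : 0 < k) (n : Int) :
    ∀ s : List Int, s.Pairwise (· ≤ ·) →
      topStep k (lastK k s) n = lastK k (insertAsc s n) := by
  intro s
  induction s with
  | nil =>
    intro _
    simp only [lastK_nil, topStep, insertAsc, lastK_cons, List.length_nil]
    split_ifs <;> simp_all
  | cons a s' ih =>
    intro hp
    have hp' : s'.Pairwise (· ≤ ·) := hp.tail
    have hax : ∀ x ∈ s', a ≤ x := fun x hx => (List.pairwise_cons.mp hp).1 x hx
    simp only [insertAsc]
    by_cases han : a ≤ n
    · -- insertion goes past a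
      simp only [if_pos han, lastK_cons, length_insertAsc]
      by_cases h1 : s'.length + 1 ≤ k
      · rw [if_pos h1]
        by_cases h2 : s'.length + 2 ≤ k
        · -- still room: plain insert, no pop
          rw [if_pos (by omega : s'.length + 1 + 1 ≤ k)]
          simp only [topStep, List.length_cons]
          rw [if_pos (Or.inl (by omega))]
          simp only [insertAsc, if_pos han]
          rw [if_neg (by simp only [List.length_cons, length_insertAsc]; omega)]
        · -- buffer exactly full
          have hlen : s'.length + 1 = k := by omega
          rw [if_neg (by omega : ¬ s'.length + 1 + 1 ≤ k)]
          simp only [topStep, List.length_cons]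
          by_cases hcond : a < n
          · rw [if_pos (Or.inr (by simpa using hcond))]
            simp only [insertAsc, if_pos han, List.length_cons, length_insertAsc]
            rw [if_pos (by omega)]
            simp only [List.tail_cons]
            rw [lastK_of_le k _ (by rw [length_insertAsc]; omega)]
          · have hna : a = n := le_antisymm han (not_lt.mp hcond)
            rw [if_neg (by rw [not_or]; exact ⟨by omega, by simp only [List.headD_cons]; omega⟩)]
            rw [insertAsc_of_ge s' n (by intro x hx; rw [← hna]; exact hax x hx)]
            rw [lastK_of_le k _ (by simp; omega)]
            simp [hna]
      · -- buffer does not contain a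
        rw [if_neg h1, if_neg (by omega : ¬ s'.length + 1 + 1 ≤ k)]
        exact ih hp'
    · -- n < a : n goes to the very front
      have hna : n < a := lt_of_not_ge han
      rw [if_neg han, lastK_cons, lastK_cons]
      simp only [List.length_cons]
      by_cases h1 : s'.length + 1 + 1 ≤ k
      · rw [if_pos h1, if_pos (by omega : s'.length + 1 ≤ k)]
        simp only [topStep, List.length_cons]
        rw [if_pos (Or.inl (by omega))]
        simp only [insertAsc, if_neg han]
        rw [if_neg (by simp only [List.length_cons]; omega)]
      · rw [if_neg h1]
        by_cases h2 : s'.length + 1 ≤ k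
        · -- full with exactly k elements a :: s'
          have hlen : s'.length + 1 = k := by omega
          rw [if_pos h2]
          simp only [topStep, List.length_cons, List.headD_cons]
          rw [if_neg (by rw [not_or]; exact ⟨by omega, by omega⟩)]
          exact (lastK_of_le k _ (by simp only [List.length_cons]; omega)).symm
        · -- more than k elements: head of buffer is ≥ a > n, unchanged
          rw [if_neg h2]
          rw [lastK_cons, if_neg h2]
          have hne : (lastK k s').length = k := by rw [length_lastK]; omega
          obtain ⟨h0, t0, ht0⟩ : ∃ h0 t0, lastK k s' = h0 :: t0 := by
            cases h : lastK k s' with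
            | nil => rw [h] at hne; simp at hne; omega
            | cons x xs => exact ⟨x, xs, rfl⟩
          have hh0 : a ≤ h0 := hax h0 (mem_lastK (by rw [ht0]; simp))
          have hlt : t0.length + 1 = k := by
            have h := hne; rw [ht0] at h; simpa using h
          rw [ht0]
          simp only [topStep, List.length_cons, List.headD_cons]
          rw [if_neg (by rw [not_or]; exact ⟨by omega, by omega⟩)]

-- Source B's part-2 buffer is the last k of the sorted list
theorem foldl_topStep (k : Nat) (hk : 0 < k) (l : List Int) :
    l.foldl (topStep k) [] = lastK k (PySem.List.sorted l (fun x => x) false) := by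
  induction l using List.reverseRecOn with
  | nil => simp [PySem.List.sorted_eq_foldl_insertBy, lastK]
  | append_singleton l n ih =>
    rw [List.foldl_append, List.foldl_cons, List.foldl_nil, ih]
    have hsorted : (PySem.List.sorted l (fun x => x) false).Pairwise (· ≤ ·) := by
      simpa using PySem.List.sorted_pairwise (xs := l) (key := fun x => x)
    rw [topStep_lastK k hk n _ hsorted]
    congr 1
    rw [PySem.List.sorted_eq_foldl_insertBy, PySem.List.sorted_eq_foldl_insertBy,
      List.foldl_append, List.foldl_cons, List.foldl_nil, insertAsc_eq_insertBy]

-- sum bookkeeping for part 2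
theorem part2_eq (l : List Int) (k : Nat) (hk : 1 < k) :
    (PySem.List.slice (PySem.List.sorted l (fun x => x) false) none (some (-(k : Int)))).sum
      = l.sum - (l.foldl (topStep k) []).sum := by
  rw [foldl_topStep k (by omega) l]
  set s := PySem.List.sorted l (fun x => x) false with hs
  have hperm : s.Perm l := PySem.List.sorted_perm l (fun x => x) false
  have hsum : s.sum = l.sum := hperm.sum_eq
  rw [PySem.List.slice_to_neg_natCast (xs := s) (k := k) (by omega)]
  unfold lastK
  have : s.take (s.length - k) ++ s.drop (s.length - k) = s := List.take_append_drop _ _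
  have h2 : (s.take (s.length - k)).sum + (s.drop (s.length - k)).sum = l.sum := by
    rw [← List.sum_append, this, hsum]
  omega

-- every other element, starting at the head
def evens : List Int → List Int
  | [] => []
  | [a] => [a]
  | a :: _ :: t => a :: evens t

theorem evens_cons (a : Int) (r : List Int) : evens (a :: r) = a :: evens r.tail := by
  cases r <;> rfl

theorem filterMap_evens (l : List Int) :
    List.filterMap (fun k : Nat => l[(2 * (k : Int)).toNat]?) (List.range ((l.length + 1) / 2))
      = evens l := by
  induction l using evens.induct with
  | case1 => simp [evens]
  | case2 a => simp [List.range_succ, evens]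
  | case3 a b t ih =>
    have hlen : ((a :: b :: t).length + 1) / 2 = (t.length + 1) / 2 + 1 := by
      simp [List.length_cons]; omega
    rw [hlen, List.range_succ_eq_map, List.filterMap_cons, List.filterMap_map]
    have h0 : (a :: b :: t)[(2 * ((0 : Nat) : Int)).toNat]? = some a := by simp
    rw [h0]
    simp only [evens]
    have hrest : List.filterMap ((fun k : Nat => (a :: b :: t)[(2 * (k : Int)).toNat]?) ∘ Nat.succ)
        (List.range ((t.length + 1) / 2)) = evens t := by
      rw [← ih]
      apply List.filterMap_congr
      intro k _
      have h2 : (2 * ((k + 1 : Nat) : Int)).toNat = (2 * ((k : Nat) : Int)).toNat + 1 + 1 := by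
        push_cast; omega
      simp only [Function.comp_apply, Nat.succ_eq_add_one, h2, List.getElem?_cons_succ]
    rw [hrest]

theorem slice2_none (l : List Int) :
    PySem.List.slice? l none none 2 = some (evens l) := by
  rw [← filterMap_evens l]
  simp only [PySem.List.slice?, PySem.List.sliceIndices]
  norm_num
  congr 2
  split_ifs with h <;> omega

theorem slice2_one (l : List Int) :
    PySem.List.slice? l (some 1) none 2 = some (evens l.tail) := by
  cases l with
  | nil => decide
  | cons x r =>
    rw [List.tail_cons, ← filterMap_evens r]
    simp only [PySem.List.slice?, PySem.List.sliceIndices]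
    norm_num
    have hc : (if 0 < r.length then (((r.length:Int) + 2 - 1) / 2).toNat else 0) = (r.length + 1) / 2 := by
      split_ifs with h <;> omega
    rw [hc]
    apply List.filterMap_congr
    intro k _
    have h1 : ((1:Int) + 2 * (k:Int)).toNat = (2 * (k:Int)).toNat + 1 := by omega
    simp only [h1, List.getElem?_cons_succ]

theorem altfold (l : List Int) (t s : Int) :
    (l.foldl (fun (p : Int × Int) n => (p.1 + p.2 * n, -p.2)) (t, s)).1
      = t + s * ((evens l).sum - (evens l.tail).sum) := by
  induction l generalizing t s with
  | nil => simp [evens]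
  | cons n r ih =>
    rw [List.foldl_cons, ih]
    simp only [List.tail_cons, evens_cons, List.sum_cons]
    ring

-- ===== VERDICT (by name: the statement is the Claim_ definition above) =====
theorem solve_spec : Claim_equal_solve := by
  intro part data testing _ _
  unfold Spec_solve solve solve_alt
  by_cases h1 : part = 1
  · simp [h1]
  · by_cases h2 : part = 2
    · simp only [h2, if_true]
      cases testing
      · simpa using part2_eq _ 20 (by omega)
      · simpa using part2_eq _ 2 (by omega)
    · simp only [h1, h2, if_false]
      rw [slice2_none, slice2_one]
      simp only [Option.getD_some]
      rw [altfold]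
      ring
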